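-- pv_equiv track=rewrite | github.com/sw1203/Coding_study | Programmers/1_42586.py | solution
-- ===== SOURCE A (Python) =====
-- def solution(progresses, speeds):
--     answer = []
--     stack = []
--
--     for p, s in zip(progresses, speeds):
--         todo = 100 - p
--         if todo % s != 0:
--             worktimes = todo//s + 1
--         else:
--             worktimes = todo//s
--
--         if not stack:
--             stack.append(worktimes)
--         elif worktimes > stack[0]:
--                 answer.append(len(stack))
--                 stack.clear()
--                 stack.append(worktimes)
--         else:
--             stack.append(worktimes)
--
--     if stack:
--         answer.append(len(stack))
--
--     return answer
-- ===== SOURCE B (Python) =====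
-- def solution(progresses, speeds):
--     days = [-(-(100 - p) // s) for p, s in zip(progresses, speeds)]
--     answer = []
--     i = 0
--     n = len(days)
--     while i < n:
--         leader = days[i]
--         j = i + 1
--         while j < n and days[j] <= leader:
--             j += 1
--         answer.append(j - i)
--         i = j
--     return answer
-- ===== Notes on version B (the rewrite author's own statement) =====
-- stated objective: alternative
-- what changed: B first materialises the exact-ceil days list, then groups it with a two-pointer consume-a-run scan (leader + inner advance), replacing A's single accumulate-into-stack pass with inline ceiling branching.
-- outside the precondition, e.g. on solution([50], [0]): A raises ZeroDivisionError, B raises ZeroDivisionError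
import Mathlib
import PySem

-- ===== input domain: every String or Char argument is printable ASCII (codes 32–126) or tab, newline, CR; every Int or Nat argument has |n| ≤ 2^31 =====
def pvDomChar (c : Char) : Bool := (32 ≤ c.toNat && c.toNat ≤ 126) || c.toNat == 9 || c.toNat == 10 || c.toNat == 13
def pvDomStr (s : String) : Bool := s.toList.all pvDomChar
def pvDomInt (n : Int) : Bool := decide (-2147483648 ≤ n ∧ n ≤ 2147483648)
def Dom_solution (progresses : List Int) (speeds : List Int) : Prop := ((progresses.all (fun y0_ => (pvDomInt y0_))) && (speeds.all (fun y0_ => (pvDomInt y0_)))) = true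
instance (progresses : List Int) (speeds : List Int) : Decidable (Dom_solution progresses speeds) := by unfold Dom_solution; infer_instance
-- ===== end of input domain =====

-- B computes the days list with an exact integer ceiling and groups it by a two-pointer
-- consume-a-run scan instead of A's accumulate-into-stack single pass; alternative, same cost.


-- ===== PORT A =====
-- one step of A's for-loop: state = (answer, stack)
def aStep (st : List Int × List Int) (ps : Int × Int) : List Int × List Int :=
  let todo : Int := 100 - ps.1
  let worktimes : Int :=
    if PySem.Int.mod todo ps.2 ≠ 0 then PySem.Int.floordiv todo ps.2 + 1
    else PySem.Int.floordiv todo ps.2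
  match st.2 with
  | [] => (st.1, [worktimes])
  | h :: t =>
    if worktimes > h then (st.1 ++ [(Int.ofNat (h :: t).length)], [worktimes])
    else (st.1, (h :: t) ++ [worktimes])

def solution (progresses : List Int) (speeds : List Int) : List Int :=
  let st := (List.zip progresses speeds).foldl aStep ([], [])
  if st.2 ≠ [] then st.1 ++ [(Int.ofNat st.2.length)] else st.1

-- ===== PORT B =====
-- days[i] = -(-(100 - p) // s), the exact integer ceiling
def bDay (ps : Int × Int) : Int := -(PySem.Int.floordiv (-(100 - ps.1)) ps.2)

-- two-pointer grouping: leader = head, inner pointer advances while days[j] ≤ leader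
def bGroup : List Int → List Int
  | [] => []
  | d :: rest =>
    (Int.ofNat ((rest.takeWhile (fun x => decide (x ≤ d))).length + 1)) ::
      bGroup (rest.dropWhile (fun x => decide (x ≤ d)))
termination_by l => l.length
decreasing_by
  simp only [List.length_cons]
  exact Nat.lt_succ_of_le (List.length_dropWhile_le _ _)

def solution_alt (progresses : List Int) (speeds : List Int) : List Int :=
  bGroup ((List.zip progresses speeds).map bDay)

-- ===== PRECONDITION & SPEC =====
-- A raises ZeroDivisionError when a zipped speed is 0 (B raises there too); exactly those inputs are excluded.
def Pre_solution (progresses : List Int) (speeds : List Int) : Prop :=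
  ∀ q ∈ List.zip progresses speeds, q.2 ≠ 0
instance (progresses : List Int) (speeds : List Int) : Decidable (Pre_solution progresses speeds) := by unfold Pre_solution; infer_instance
def pvWitness_solution : List Int × List Int := ([93, 30, 55], [1, 30, 5])

def Spec_solution (progresses : List Int) (speeds : List Int) (out : List Int) : Prop := out = solution_alt progresses speeds
instance (progresses : List Int) (speeds : List Int) (out : List Int) : Decidable (Spec_solution progresses speeds out) := by unfold Spec_solution; infer_instance

-- ===== CLAIM (what is proved, stated in full; the proofs are below) =====
def Claim_equal_solution : Prop := ∀ (progresses : List Int) (speeds : List Int), Dom_solution progresses speeds → Pre_solution progresses speeds → Spec_solution progresses speeds (solution progresses speeds)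

-- ===== LEMMAS AND PROOFS =====

theorem bGroup_nil : bGroup [] = [] := by unfold bGroup; rfl

theorem bGroup_cons (d : Int) (rest : List Int) :
    bGroup (d :: rest) = (Int.ofNat ((rest.takeWhile (fun x => decide (x ≤ d))).length + 1)) ::
      bGroup (rest.dropWhile (fun x => decide (x ≤ d))) := by
  rw [bGroup]

-- A's branchy worktimes value equals B's negated-floor ceiling, for any nonzero divisor
theorem worktimes_eq_ceil (t s : Int) (hs : s ≠ 0) :
    (if PySem.Int.mod t s ≠ 0 then PySem.Int.floordiv t s + 1 else PySem.Int.floordiv t s)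
      = -(PySem.Int.floordiv (-t) s) := by
  have h1 := PySem.Int.floordiv_mul_add_mod t s
  have h2 := PySem.Int.floordiv_mul_add_mod (-t) s
  set f1 := PySem.Int.floordiv t s with hf1
  set m1 := PySem.Int.mod t s with hm1
  set f2 := PySem.Int.floordiv (-t) s with hf2
  set m2 := PySem.Int.mod (-t) s with hm2
  have hk : (f1 + f2) * s = -(m1 + m2) := by linear_combination h1 + h2
  rcases lt_or_gt_of_ne hs with h | h
  · obtain ⟨c1, c1'⟩ := PySem.Int.mod_neg_bounds (a := t) h
    obtain ⟨c2, c2'⟩ := PySem.Int.mod_neg_bounds (a := -t) h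
    rw [← hm1] at c1 c1'
    rw [← hm2] at c2 c2'
    by_cases hm : m1 = 0
    · have hk0 : f1 + f2 = 0 := by
        rcases lt_trichotomy (f1 + f2) 0 with hc | hc | hc
        · have := mul_le_mul_of_nonpos_right (show f1 + f2 ≤ -1 by omega) h.le
          linarith
        · exact hc
        · have := mul_le_mul_of_nonpos_right (show (1:Int) ≤ f1 + f2 by omega) h.le
          linarith
      simp only [hm, ne_eq, not_true_eq_false, if_false]
      omega
    · have hk1 : f1 + f2 = -1 := by
        have hm1pos : m1 < 0 := by omega
        rcases lt_trichotomy (f1 + f2) (-1) with hc | hc | hc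
        · have := mul_le_mul_of_nonpos_right (show f1 + f2 ≤ -2 by omega) h.le
          linarith
        · exact hc
        · have := mul_le_mul_of_nonpos_right (show (0:Int) ≤ f1 + f2 by omega) h.le
          linarith
      simp only [ne_eq, hm, not_false_eq_true, if_pos]
      omega
  · have c1 := PySem.Int.mod_nonneg (a := t) h
    have c1' := PySem.Int.mod_lt (a := t) h
    have c2 := PySem.Int.mod_nonneg (a := -t) h
    have c2' := PySem.Int.mod_lt (a := -t) h
    rw [← hm1] at c1 c1'
    rw [← hm2] at c2 c2'
    by_cases hm : m1 = 0
    · have hk0 : f1 + f2 = 0 := by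
        rcases lt_trichotomy (f1 + f2) 0 with hc | hc | hc
        · have := mul_le_mul_of_nonneg_right (show f1 + f2 ≤ -1 by omega) h.le
          linarith
        · exact hc
        · have := mul_le_mul_of_nonneg_right (show (1:Int) ≤ f1 + f2 by omega) h.le
          linarith
      simp only [hm, ne_eq, not_true_eq_false, if_false]
      omega
    · have hk1 : f1 + f2 = -1 := by
        have hm1pos : 0 < m1 := by omega
        rcases lt_trichotomy (f1 + f2) (-1) with hc | hc | hc
        · have := mul_le_mul_of_nonneg_right (show f1 + f2 ≤ -2 by omega) h.le
          linarith
        · exact hc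
        · have := mul_le_mul_of_nonneg_right (show (0:Int) ≤ f1 + f2 by omega) h.le
          linarith
      simp only [ne_eq, hm, not_false_eq_true, if_true]
      omega

def gStep (st : List Int × List Int) (w : Int) : List Int × List Int :=
  match st.2 with
  | [] => (st.1, [w])
  | h :: t =>
    if w > h then (st.1 ++ [(Int.ofNat (h :: t).length)], [w])
    else (st.1, (h :: t) ++ [w])

-- aStep depends on its pair only through bDay (given the speed is nonzero)
theorem aStep_eq_gStep (st : List Int × List Int) (ps : Int × Int) (hs : ps.2 ≠ 0) :
    aStep st ps = gStep st (bDay ps) := by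
  simp only [aStep, gStep, bDay, worktimes_eq_ceil (100 - ps.1) ps.2 hs]

def finishA (st : List Int × List Int) : List Int :=
  if st.2 ≠ [] then st.1 ++ [(Int.ofNat st.2.length)] else st.1

-- the batch invariant: a nonempty stack with leader h is finished exactly as B's run at leader h
theorem loop_invariant (days : List Int) :
    ∀ (answer t : List Int) (h : Int),
      finishA (days.foldl gStep (answer, h :: t)) =
        answer ++ (Int.ofNat (t.length + 1 + (days.takeWhile (fun x => decide (x ≤ h))).length))
          :: bGroup (days.dropWhile (fun x => decide (x ≤ h))) := by
  induction days with
  | nil =>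
    intro answer t h
    simp [finishA, List.takeWhile, List.dropWhile, bGroup_nil]
  | cons d rest ih =>
    intro answer t h
    by_cases hd : d ≤ h
    · have hg : gStep (answer, h :: t) d = (answer, h :: (t ++ [d])) := by
        simp [gStep]; omega
    
      simp only [List.foldl_cons, hg, ih, List.takeWhile, List.dropWhile, hd, decide_true,
        List.length_cons, List.length_append, List.length]
      ring_nf
    · have hgt : d > h := by omega
      have hg : gStep (answer, h :: t) d = (answer ++ [(Int.ofNat (t.length + 1))], [d]) := by
        simp [gStep, hgt]
      simp only [List.foldl_cons, hg, ih, List.takeWhile, List.dropWhile,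
        show decide (d ≤ h) = false by simp [hd]]
      rw [bGroup_cons]
      simp
      omega

theorem fold_eq_bGroup (ds : List Int) :
    finishA (ds.foldl gStep ([], [])) = bGroup ds := by
  cases ds with
  | nil => simp [finishA, bGroup_nil]
  | cons d rest =>
    have h0 : gStep (([] : List Int), ([] : List Int)) d = ([], [d]) := rfl
    simp only [List.foldl_cons, h0, loop_invariant rest [] [] d]
    rw [bGroup_cons]
    simp
    omega

theorem foldl_aStep_eq (l : List (Int × Int)) (hl : ∀ q ∈ l, q.2 ≠ 0) (st : List Int × List Int) :
    l.foldl aStep st = (l.map bDay).foldl gStep st := by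
  induction l generalizing st with
  | nil => rfl
  | cons q l ih =>
    simp only [List.foldl_cons, List.map_cons]
    rw [aStep_eq_gStep st q (hl q (by simp))]
    exact ih (fun r hr => hl r (by simp [hr])) _

-- ===== VERDICT (by name: the statement is the Claim_ definition above) =====
theorem solution_spec : Claim_equal_solution := by
  intro progresses speeds _ hpre
  unfold Spec_solution solution solution_alt
  rw [foldl_aStep_eq _ hpre]
  exact fold_eq_bGroup _
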